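-- pv_equiv track=rewrite | github.com/Haaza22/cards | Go_fish_Q.py | score_analysis
-- ===== SOURCE A (Python) =====
-- def score_analysis(books):
--     # returns an array with the placment of 1st 2nd and so on in the index of the behaviour that got that place
--     # count how many other entries are higher or equal than item. then minue form 5
--     positions = []
--     for i in range(0, 4):
--         more = 0
--         for e in range(0, 4):
--             if books[e] <= books[i]:
--                 more = more + 1
--         positions.append(5 - more)
--
--     return positions
-- ===== SOURCE B (Python) =====
-- def score_analysis(books):
--     # Sort the four scores descending; a score's first index in that order
--     # equals the number of strictly greater scores, so index+1 is its place.
--     sorted4 = sorted(books[:4], reverse=True)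
--     return [sorted4.index(books[i]) + 1 for i in range(4)]
-- ===== Notes on version B (the rewrite author's own statement) =====
-- stated objective: simpler
-- what changed: Replaces the nested 4x4 count-of-lower-or-equal rescan by one descending sort of the first four scores followed by a first-index lookup (index in a descending-sorted list = count of strictly greater entries, so index+1 = 5 - count(<=)).
import Mathlib
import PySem

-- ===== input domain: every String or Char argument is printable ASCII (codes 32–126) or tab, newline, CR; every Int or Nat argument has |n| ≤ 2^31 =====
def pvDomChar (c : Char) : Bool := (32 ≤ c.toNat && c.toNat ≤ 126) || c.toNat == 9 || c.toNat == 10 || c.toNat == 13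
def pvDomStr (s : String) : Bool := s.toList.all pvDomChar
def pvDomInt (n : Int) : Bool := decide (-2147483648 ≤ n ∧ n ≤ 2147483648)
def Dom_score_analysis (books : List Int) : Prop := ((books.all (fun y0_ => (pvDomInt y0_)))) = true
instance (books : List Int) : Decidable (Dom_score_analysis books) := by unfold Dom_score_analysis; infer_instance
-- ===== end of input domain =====

-- B replaces A's nested 4x4 "count how many are <= each score" rescan by one descending
-- sort of the first four scores and a first-index lookup (objective: simpler).


-- ===== PORT A =====
-- books[e]/books[i] are in range for 0 ≤ e,i < 4 under Pre_ (length ≥ 4), so pyGetD is exact there.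
def score_analysis (books : List Int) : List Int :=
  (PySem.List.pyRange 0 4 1).foldl (fun positions i =>
    let more := (PySem.List.pyRange 0 4 1).foldl (fun more e =>
      if PySem.List.pyGetD books e 0 ≤ PySem.List.pyGetD books i 0 then more + 1 else more)
      (0 : Int)
    positions ++ [5 - more]) []

-- ===== PORT B =====
-- sorted4.index(books[i]) always succeeds under Pre_ (books[i] is among the first four),
-- so the .getD 0 on index? is exact there.
def score_analysis_alt (books : List Int) : List Int :=
  let sorted4 := PySem.List.sorted (PySem.List.slice books none (some 4)) (fun x => x) true
  (PySem.List.pyRange 0 4 1).map (fun i =>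
    (((PySem.List.index? sorted4 (PySem.List.pyGetD books i 0)).getD 0 : Nat) : Int) + 1)

-- ===== PRECONDITION & SPEC =====
-- A raises IndexError (books[i]) when the list has fewer than four entries; Pre_ excludes exactly those.
def Pre_score_analysis (books : List Int) : Prop := 4 ≤ books.length
instance (books : List Int) : Decidable (Pre_score_analysis books) := by
  unfold Pre_score_analysis; infer_instance
def pvWitness_score_analysis : List Int := [3, 1, 3, 2]

def Spec_score_analysis (books : List Int) (out : List Int) : Prop := out = score_analysis_alt books
instance (books : List Int) (out : List Int) : Decidable (Spec_score_analysis books out) := by unfold Spec_score_analysis; infer_instance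

-- ===== CLAIM (what is proved, stated in full; the proofs are below) =====
def Claim_equal_score_analysis : Prop := ∀ (books : List Int), Dom_score_analysis books → Pre_score_analysis books → Spec_score_analysis books (score_analysis books)

-- ===== LEMMAS AND PROOFS =====

-- In a descending-sorted copy of l, the first index of x ∈ l equals how many elements of l are strictly greater.
theorem idx_sorted_rev_eq_count_gt (l : List Int) (x : Int) (hx : x ∈ l) :
    ((PySem.List.index? (PySem.List.sorted l (fun y => y) true) x).getD 0 : Nat)
      = l.countP (fun y => decide (x < y)) := by
  set s := PySem.List.sorted l (fun y => y) true with hs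
  have hperm : s.Perm l := PySem.List.sorted_perm l (fun y => y) true
  have hxs : x ∈ s := by rw [hs, PySem.List.mem_sorted]; exact hx
  have hsome : (PySem.List.index? s x).isSome := (PySem.List.index?_isSome_iff s x).mpr hxs
  obtain ⟨k, hk⟩ := Option.isSome_iff_exists.mp hsome
  obtain ⟨pre, suf, hsplit, hlen, hnot⟩ := (PySem.List.index?_eq_some_iff s x k).mp hk
  have hpair : s.Pairwise (fun a b => b ≤ a) := by
    have := PySem.List.sorted_pairwise_rev l (fun y => y)
    simpa using this
  rw [hsplit] at hpair
  rw [List.pairwise_append] at hpair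
  obtain ⟨hp1, hp2, hp3⟩ := hpair
  have hcount : l.countP (fun y => decide (x < y)) = s.countP (fun y => decide (x < y)) :=
    (hperm.countP_eq _).symm
  rw [hcount, hsplit, List.countP_append]
  have hpre : pre.countP (fun y => decide (x < y)) = pre.length := by
    rw [List.countP_eq_length]
    intro p hp
    have hxp : x ≤ p := hp3 p hp x (List.mem_cons_self)
    have : p ≠ x := fun h => hnot (h ▸ hp)
    simp; omega
  have hsuf : (x :: suf).countP (fun y => decide (x < y)) = 0 := by
    rw [List.countP_eq_zero]
    intro q hq
    rcases List.mem_cons.mp hq with h | h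
    · simp [h]
    · have : q ≤ x := (List.pairwise_cons.mp hp2).1 q h
      simp; omega
  rw [hsplit] at hk
  rw [hpre, hsuf, hk]
  simp [hlen]

-- One output entry: B's place (index in the descending sort, +1) equals A's 5 − count(≤).
theorem per_elem (a b c d x : Int) (hx : x ∈ [a, b, c, d]) :
    (((PySem.List.index? (PySem.List.sorted [a, b, c, d] (fun x => x) true) x).getD 0 : Nat) : Int) + 1
      = 5 - ((((0 : Int) + (if a ≤ x then 1 else 0)) + (if b ≤ x then 1 else 0))
              + (if c ≤ x then 1 else 0) + (if d ≤ x then 1 else 0)) := by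
  rw [idx_sorted_rev_eq_count_gt [a, b, c, d] x hx]
  simp only [List.countP_cons, List.countP_nil]
  push_cast
  split_ifs <;> simp_all <;> omega

theorem score_analysis_eq_of_cons (a b c d : Int) (rest : List Int) :
    score_analysis (a::b::c::d::rest) = score_analysis_alt (a::b::c::d::rest) := by
  have hsl : PySem.List.slice (a::b::c::d::rest) none (some 4) = [a,b,c,d] := by
    simp [PySem.List.slice_to, List.take]
  have hr : PySem.List.pyRange 0 4 1 = [0,1,2,3] := by decide
  simp only [score_analysis, score_analysis_alt, hsl, hr, List.foldl, List.map,
    PySem.List.pyGetD_ofNat', List.getD]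
  simp only [List.nil_append, List.cons_append, List.getElem?_cons_zero, List.getElem?_cons_succ,
    Option.getD_some]
  have hsplit : ∀ (p : Prop) [Decidable p] (X : Int), (if p then X + 1 else X) = X + (if p then 1 else 0) := by
    intro p _ X; split_ifs <;> omega
  simp only [hsplit]
  simp only [List.cons.injEq]
  exact ⟨(per_elem a b c d a (by simp)).symm, (per_elem a b c d b (by simp)).symm,
         (per_elem a b c d c (by simp)).symm, (per_elem a b c d d (by simp)).symm, trivial⟩

-- ===== VERDICT (by name: the statement is the Claim_ definition above) =====
theorem score_analysis_spec : Claim_equal_score_analysis := by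
  intro books _ hpre
  unfold Spec_score_analysis
  obtain ⟨a, b, c, d, rest, rfl⟩ : ∃ a b c d rest, books = a::b::c::d::rest := by
    rcases books with _ | ⟨a, _ | ⟨b, _ | ⟨c, _ | ⟨d, rest⟩⟩⟩⟩ <;>
      first
        | exact ⟨_, _, _, _, _, rfl⟩
        | (exfalso; simp [Pre_score_analysis] at hpre)
  exact score_analysis_eq_of_cons a b c d rest
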